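-- pv_equiv track=rewrite | github.com/pvdwijdeven/AutoML | automl/eda/eda.py | parse_column_descriptions_to_html
-- ===== SOURCE A (Python) =====
-- def parse_column_descriptions_to_html(text):
--     result = {}
--     current_column = None
--     current_description = []
--
--     for line in text:
--         line = line.strip()
--         if not line:  # Empty line
--             # If we have a current column, save it to the dictionary
--             if current_column is not None:
--                 # Join with HTML line breaks and strip whitespace
--                 description = "<br>".join(current_description).strip()
--                 result[current_column] = description
--                 current_column = None
--                 current_description = []
--             continue
--
--         # If we're not currently processing a column, this must be a new column name
--         if current_column is None:
--             current_column = line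
--         else:
--             current_description.append(
--                 line.replace("\t", "&nbsp;&nbsp;&nbsp;&nbsp;")
--             )
--
--     # Add the last column if there wasn't an empty line after it
--     if current_column is not None:
--         description = "<br>".join(current_description).strip()
--         result[current_column] = description
--
--     return result
-- ===== SOURCE B (Python) =====
-- def parse_column_descriptions_to_html(text):
--     # Two-phase: first collect blocks of consecutive non-empty (stripped) lines,
--     # then turn each block into one dict entry (head = column, tail = description).
--     blocks = []
--     block = []
--     for line in text:
--         s = line.strip()
--         if s:
--             block.append(s)
--         elif block:
--             blocks.append(block)
--             block = []
--     if block: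
--         blocks.append(block)
--
--     result = {}
--     for b in blocks:
--         result[b[0]] = "<br>".join(
--             x.replace("\t", "&nbsp;&nbsp;&nbsp;&nbsp;") for x in b[1:]
--         ).strip()
--     return result
-- ===== Notes on version B (the rewrite author's own statement) =====
-- stated objective: simpler
-- what changed: Replaced the line-by-line state machine (current_column/current_description with mid-loop flush and a trailing special case) by a two-phase pass: first group the lines into blocks separated by blank lines, then map each block to one dict entry.
import Mathlib
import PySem

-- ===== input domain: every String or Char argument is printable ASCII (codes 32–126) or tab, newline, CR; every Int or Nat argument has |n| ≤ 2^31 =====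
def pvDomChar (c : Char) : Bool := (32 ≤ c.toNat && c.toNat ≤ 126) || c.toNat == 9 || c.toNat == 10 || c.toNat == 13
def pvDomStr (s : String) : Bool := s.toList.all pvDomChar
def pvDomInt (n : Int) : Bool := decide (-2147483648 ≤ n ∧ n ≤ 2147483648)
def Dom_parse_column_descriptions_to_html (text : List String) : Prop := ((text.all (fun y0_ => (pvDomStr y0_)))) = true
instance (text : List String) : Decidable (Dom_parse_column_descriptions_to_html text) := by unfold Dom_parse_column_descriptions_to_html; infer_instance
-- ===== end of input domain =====

-- B replaces A's per-line state machine by a two-phase pass (group lines into blank-separated blocks, then one dict entry per block); objective: simpler.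

-- line.replace("\t", "&nbsp;&nbsp;&nbsp;&nbsp;")  (shared by both Pythons verbatim)
def pvReplTab (s : String) : String := PySem.Str.replace s "\t" "&nbsp;&nbsp;&nbsp;&nbsp;"

-- ===== PORT A =====
-- loop body of A: state = (result, current_column, current_description)
def pvStepA (st : PySem.Dict String String × Option String × List String) (line : String) :
    PySem.Dict String String × Option String × List String :=
  let l := PySem.Str.strip line
  if l = "" then
    match st.2.1 with
    | none => st
    | some cc =>
        (st.1.insert cc (PySem.Str.strip (PySem.Str.join "<br>" st.2.2)), none, [])
  else
    match st.2.1 with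
    | none => (st.1, some l, st.2.2)
    | some cc => (st.1, some cc, st.2.2 ++ [pvReplTab l])

def parse_column_descriptions_to_html (text : List String) : List (String × String) :=
  let st := text.foldl pvStepA (PySem.Dict.empty, none, [])
  -- "Add the last column if there wasn't an empty line after it"
  match st.2.1 with
  | none => st.1.items
  | some cc => (st.1.insert cc (PySem.Str.strip (PySem.Str.join "<br>" st.2.2))).items

-- ===== PORT B =====
-- phase 1 body of B: state = (blocks, block)
def pvStepB (st : List (List String) × List String) (line : String) :
    List (List String) × List String :=
  let s := PySem.Str.strip line
  if s = "" then
    if st.2 = [] then st else (st.1 ++ [st.2], [])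
  else
    (st.1, st.2 ++ [s])

-- phase 2 body of B: result[b[0]] = "<br>".join(... for x in b[1:]).strip()
-- (blocks built by phase 1 are never empty; the [] arm is unreachable)
def pvInsertBlock (d : PySem.Dict String String) (b : List String) : PySem.Dict String String :=
  match b with
  | [] => d
  | h :: t => d.insert h (PySem.Str.strip (PySem.Str.join "<br>" (t.map pvReplTab)))

def parse_column_descriptions_to_html_alt (text : List String) : List (String × String) :=
  let p := text.foldl pvStepB ([], [])
  let blocks := if p.2 = [] then p.1 else p.1 ++ [p.2]
  (blocks.foldl pvInsertBlock PySem.Dict.empty).items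

-- ===== PRECONDITION & SPEC =====
def Spec_parse_column_descriptions_to_html (text : List String) (out : List (String × String)) : Prop := out = parse_column_descriptions_to_html_alt text
instance (text : List String) (out : List (String × String)) : Decidable (Spec_parse_column_descriptions_to_html text out) := by unfold Spec_parse_column_descriptions_to_html; infer_instance

-- ===== CLAIM (what is proved, stated in full; the proofs are below) =====
def Claim_equal_parse_column_descriptions_to_html : Prop := ∀ (text : List String), Dom_parse_column_descriptions_to_html text → Spec_parse_column_descriptions_to_html text (parse_column_descriptions_to_html text)

-- ===== LEMMAS AND PROOFS =====

-- A's (current_column, current_description) in terms of B's pending block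
def pvStateOf (blk : List String) : Option String × List String :=
  match blk with
  | [] => (none, [])
  | h :: t => (some h, t.map pvReplTab)

-- A's final flush, as a function of the whole state
def pvFinishA (st : PySem.Dict String String × Option String × List String) :
    PySem.Dict String String :=
  match st.2.1 with
  | none => st.1
  | some cc => st.1.insert cc (PySem.Str.strip (PySem.Str.join "<br>" st.2.2))

-- B's phase-1 fold only ever appends to the blocks accumulator
theorem pvStepB_prefix (text : List String) (bs : List (List String)) (blk : List String) :
    text.foldl pvStepB (bs, blk)
      = (bs ++ (text.foldl pvStepB ([], blk)).1, (text.foldl pvStepB ([], blk)).2) := by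
  induction text generalizing bs blk with
  | nil => simp
  | cons l ls ih =>
    simp only [List.foldl_cons, pvStepB]
    by_cases hs : PySem.Str.strip l = ""
    · by_cases hb : blk = []
      · simp only [hs, hb, ite_true]
        exact ih bs []
      · simp only [hs, ite_true, if_neg hb]
        rw [ih (bs ++ [blk]) [], ih ([] ++ [blk]) []]
        simp [List.append_assoc]
    · rw [if_neg hs, if_neg hs]
      exact ih bs (blk ++ [PySem.Str.strip l])

-- main invariant: A's fold + flush = insert blocks-so-far, with pending block blk
theorem pvMain (text : List String) (d : PySem.Dict String String) (blk : List String) :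
    pvFinishA (text.foldl pvStepA (d, pvStateOf blk))
      = ((if (text.foldl pvStepB ([], blk)).2 = [] then (text.foldl pvStepB ([], blk)).1
          else (text.foldl pvStepB ([], blk)).1 ++ [(text.foldl pvStepB ([], blk)).2])).foldl
          pvInsertBlock d := by
  induction text generalizing d blk with
  | nil =>
    cases blk with
    | nil => simp [pvStateOf, pvFinishA]
    | cons h t => simp [pvStateOf, pvFinishA, pvInsertBlock]
  | cons l ls ih =>
    simp only [List.foldl_cons, pvStepA, pvStepB]
    by_cases hs : PySem.Str.strip l = ""
    · cases blk with
      | nil =>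
        simp only [hs, if_true, pvStateOf]
        exact ih d []
      | cons h t =>
        simp only [hs, if_true, pvStateOf, if_neg (List.cons_ne_nil h t)]
        have := ih (d.insert h (PySem.Str.strip (PySem.Str.join "<br>" (t.map pvReplTab)))) []
        simp only [pvStateOf] at this
        rw [this, pvStepB_prefix ls ([] ++ [h :: t]) []]
        by_cases hr : (ls.foldl pvStepB ([], [])).2 = [] <;>
          simp [hr, pvInsertBlock, List.foldl_append]
    · cases blk with
      | nil =>
        simp only [hs, pvStateOf]
        have := ih d [PySem.Str.strip l]
        simp only [pvStateOf] at this
        simpa using this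
      | cons h t =>
        simp only [hs, pvStateOf]
        have := ih d ((h :: t) ++ [PySem.Str.strip l])
        simp only [pvStateOf] at this
        simpa using this

-- ===== VERDICT (by name: the statement is the Claim_ definition above) =====
theorem parse_column_descriptions_to_html_spec : Claim_equal_parse_column_descriptions_to_html := by
  intro text _
  unfold Spec_parse_column_descriptions_to_html
  unfold parse_column_descriptions_to_html parse_column_descriptions_to_html_alt
  have h := pvMain text PySem.Dict.empty []
  simp only [pvStateOf, pvFinishA] at h
  cases hcc : (text.foldl pvStepA (PySem.Dict.empty, none, []) ).2.1 with
  | none => simp only [hcc] at h ⊢; rw [h]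
  | some cc => simp only [hcc] at h ⊢; rw [h]
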